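-- pv_equiv track=rewrite | github.com/vidyasagar06K/Encoding_Decoding_tool | Encoding_Decoding tool.py | nrz_i_decode
-- ===== SOURCE A (Python) =====
-- def nrz_i_decode(encoded_data):
--     decoded_data = []
--     current_bit = 0
--     for level in encoded_data:
--         if level == 0:
--             decoded_data.append(str(current_bit))
--         else:
--             current_bit = 1 - current_bit
--             decoded_data.append(str(current_bit))
--     return decoded_data
-- ===== SOURCE B (Python) =====
-- def nrz_i_decode(encoded_data):
--     # derive-flags -> prefix-count -> map pipeline: output bit is the running
--     # parity of the number of nonzero levels seen so far (inclusive)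
--     counts = []
--     total = 0
--     for level in encoded_data:
--         total += (level != 0)
--         counts.append(total)
--     return [str(t % 2) for t in counts]
-- ===== Notes on version B (the rewrite author's own statement) =====
-- stated objective: alternative
-- what changed: Replaces the branch-and-mutate bit-toggling loop with a derive-flags -> prefix-count -> map pipeline: count nonzero levels seen so far, then map each running count mod 2 to its string.
import Mathlib
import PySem

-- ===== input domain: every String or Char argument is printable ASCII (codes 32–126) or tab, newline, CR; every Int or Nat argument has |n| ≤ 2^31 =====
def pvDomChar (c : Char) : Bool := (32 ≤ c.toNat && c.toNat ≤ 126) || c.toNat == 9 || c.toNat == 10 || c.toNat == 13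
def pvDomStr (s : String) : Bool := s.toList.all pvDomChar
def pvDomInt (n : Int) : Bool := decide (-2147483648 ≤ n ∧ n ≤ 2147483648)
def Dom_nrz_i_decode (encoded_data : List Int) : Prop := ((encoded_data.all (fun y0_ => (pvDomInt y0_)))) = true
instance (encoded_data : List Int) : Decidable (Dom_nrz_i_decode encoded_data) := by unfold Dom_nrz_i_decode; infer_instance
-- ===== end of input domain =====

-- B replaces A's branch-and-mutate toggling loop by a derive-flags → prefix-count → map pipeline (alternative decomposition, same cost).

-- ===== PORT A =====
-- one loop iteration of A: state = (decoded_data, current_bit)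
def nrzAStep (st : List String × Int) (level : Int) : List String × Int :=
  if level == 0 then (st.1 ++ [PySem.Int.toStr st.2], st.2)
  else (st.1 ++ [PySem.Int.toStr (1 - st.2)], 1 - st.2)

def nrz_i_decode (encoded_data : List Int) : List String :=
  (encoded_data.foldl nrzAStep ([], 0)).1

-- ===== PORT B =====
-- one iteration of B's prefix-count loop: state = (total, counts)
def nrzBStep (st : Int × List Int) (level : Int) : Int × List Int :=
  let t := st.1 + (if level != 0 then 1 else 0)
  (t, st.2 ++ [t])

def nrz_i_decode_alt (encoded_data : List Int) : List String :=
  ((encoded_data.foldl nrzBStep (0, [])).2).map (fun t => PySem.Int.toStr (PySem.Int.mod t 2))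

-- ===== PRECONDITION & SPEC =====
def Spec_nrz_i_decode (encoded_data : List Int) (out : List String) : Prop := out = nrz_i_decode_alt encoded_data
instance (encoded_data : List Int) (out : List String) : Decidable (Spec_nrz_i_decode encoded_data out) := by unfold Spec_nrz_i_decode; infer_instance

-- ===== CLAIM (what is proved, stated in full; the proofs are below) =====
def Claim_equal_nrz_i_decode : Prop := ∀ (encoded_data : List Int), Dom_nrz_i_decode encoded_data → Spec_nrz_i_decode encoded_data (nrz_i_decode encoded_data)

-- ===== LEMMAS AND PROOFS =====

-- B's fold only ever appends to the accumulated list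
theorem nrzB_append (xs : List Int) (c : Int) (ps : List Int) :
    (xs.foldl nrzBStep (c, ps)).2 = ps ++ (xs.foldl nrzBStep (c, [])).2 := by
  induction xs generalizing c ps with
  | nil => simp
  | cons x xs ih =>
      simp only [List.foldl, nrzBStep]
      rw [ih, ih]
      conv_rhs => rw [ih]
      simp

theorem mod_succ_two (c : Int) : PySem.Int.mod (c + 1) 2 = 1 - PySem.Int.mod c 2 := by
  rw [PySem.Int.mod_eq_emod_of_pos (by norm_num), PySem.Int.mod_eq_emod_of_pos (by norm_num)]
  omega

-- the invariant: A's running bit equals the running count mod 2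
theorem nrz_main (xs : List Int) (ds : List String) (c : Int) :
    (xs.foldl nrzAStep (ds, PySem.Int.mod c 2)).1
      = ds ++ ((xs.foldl nrzBStep (c, [])).2).map (fun t => PySem.Int.toStr (PySem.Int.mod t 2)) := by
  induction xs generalizing ds c with
  | nil => simp
  | cons x xs ih =>
      by_cases hx : x = 0
      · simp only [List.foldl, nrzAStep, nrzBStep, hx]
        simp only [beq_self_eq_true, if_true, bne_self_eq_false, Bool.false_eq_true, if_false,
          add_zero]
        simp only [List.nil_append]
        rw [ih, nrzB_append xs c [c]]
        simp
      · simp only [List.foldl, nrzAStep, nrzBStep]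
        rw [if_neg (by simpa using hx), if_pos (by simpa using hx)]
        simp only [List.nil_append]
        rw [← mod_succ_two, ih, nrzB_append xs (c + 1) [c + 1]]
        simp

-- ===== VERDICT (by name: the statement is the Claim_ definition above) =====
theorem nrz_i_decode_spec : Claim_equal_nrz_i_decode := by
  intro xs _
  show nrz_i_decode xs = nrz_i_decode_alt xs
  have h := nrz_main xs [] 0
  simpa [nrz_i_decode, nrz_i_decode_alt, PySem.Int.mod] using h
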